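-- pv_equiv track=rewrite | github.com/DimSap/project2_Sapronov_Dmitrii_M25-555 | src/primitive_db/parser.py | parse_set_clause
-- ===== SOURCE A (Python) =====
-- def _split_values(raw):
--     items = []
--     current = []
--     in_quotes = False
--     for char in raw:
--         if char == '"':
--             in_quotes = not in_quotes
--             current.append(char)
--             continue
--         if char == ',' and not in_quotes:
--             item = ''.join(current).strip()
--             if item:
--                 items.append(item)
--             current = []
--             continue
--         current.append(char)
--     if current:
--         items.append(''.join(current).strip())
--     return items
--
-- def _parse_value(raw):
--     value = raw.strip()
--     if value.startswith('"') and value.endswith('"') and len(value) >= 2: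
--         return value[1:-1]
--
--     lowered = value.lower()
--     if lowered == "true":
--         return True
--     if lowered == "false":
--         return False
--
--     try:
--         return int(value)
--     except ValueError:
--         return value
--
-- def parse_set_clause(raw):
--     assignments = {}
--     for part in _split_values(raw):
--         if "=" not in part:
--             continue
--         left, right = part.split("=", 1)
--         key = left.strip()
--         assignments[key] = _parse_value(right)
--     return assignments
-- ===== SOURCE B (Python) =====
-- def _coerce(raw):
--     v = raw.strip()
--     if len(v) >= 2 and v[0] == '"' and v[-1] == '"':
--         return v[1:-1]
--     low = v.lower()
--     if low in ("true", "false"):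
--         return low == "true"
--     try:
--         return int(v)
--     except ValueError:
--         return v
--
--
-- def parse_set_clause(raw):
--     # quote-aware tokenization by split-then-merge: cut at every comma, then
--     # glue adjacent fragments back together while the accumulated number of
--     # double-quotes in the buffer is odd (i.e. the comma was inside quotes)
--     parts = []
--     buf = None
--     for frag in raw.split(','):
--         buf = frag if buf is None else buf + ',' + frag
--         if buf.count('"') % 2 == 0:
--             parts.append(buf)
--             buf = None
--     if buf is not None:
--         parts.append(buf)
--     assignments = {}
--     for part in parts:
--         part = part.strip()
--         left, eq, right = part.partition('=')
--         if eq: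
--             assignments[left.strip()] = _coerce(right)
--     return assignments
-- ===== Notes on version B (the rewrite author's own statement) =====
-- stated objective: faster
-- what changed: B replaces A's per-character quote-tracking state machine with a split-on-every-comma pass (C-level str.split/str.count) that merges adjacent fragments back while the buffer holds an odd number of double-quotes, and uses str.partition on each stripped part instead of a membership test plus a bounded split.
import Mathlib
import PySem

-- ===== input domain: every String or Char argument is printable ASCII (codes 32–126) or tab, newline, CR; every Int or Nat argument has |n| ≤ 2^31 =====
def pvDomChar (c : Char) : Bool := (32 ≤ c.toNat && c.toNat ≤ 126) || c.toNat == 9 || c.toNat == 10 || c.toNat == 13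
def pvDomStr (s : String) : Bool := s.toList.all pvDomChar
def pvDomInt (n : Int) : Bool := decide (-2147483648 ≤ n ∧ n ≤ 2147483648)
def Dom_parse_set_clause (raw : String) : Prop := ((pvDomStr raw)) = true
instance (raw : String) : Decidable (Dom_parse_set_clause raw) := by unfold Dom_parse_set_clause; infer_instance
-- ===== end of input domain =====

-- B re-implements A's per-character quote-tracking tokenizer as a split-on-every-comma pass merged back by
-- quote parity (measured objective: constant-factor speed from C-level split/count in Python); equal return
-- value on all inputs. Python's heterogeneous dict values (str/bool/int) are rendered via str() in both ports.

-- ===== PORT A =====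
def pvA_parseValue (raw : List Char) : List Char :=
  let v := PySem.Chars.strip raw
  if PySem.Chars.startswith v ['"'] && PySem.Chars.endswith v ['"'] && decide (2 ≤ v.length) then
    PySem.Chars.slice v (some 1) (some (-1))
  else
    let lowered := PySem.Chars.lower v
    -- bool/int results of the Python are rendered via str()
    if lowered = "true".toList then "True".toList
    else if lowered = "false".toList then "False".toList
    else
      match PySem.Int.ofChars? v with
      | some n => PySem.Int.toChars n
      | none => v

def pvA_splitStep (s : List (List Char) × List Char × Bool) (c : Char) :
    List (List Char) × List Char × Bool :=
  if c = '"' then (s.1, s.2.1 ++ [c], !s.2.2)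
  else if c = ',' && !s.2.2 then
    (if PySem.Chars.strip s.2.1 = [] then s.1 else s.1 ++ [PySem.Chars.strip s.2.1], [], s.2.2)
  else (s.1, s.2.1 ++ [c], s.2.2)

def pvA_split (raw : List Char) : List (List Char) :=
  let st := raw.foldl pvA_splitStep ([], [], false)
  if st.2.1 = [] then st.1 else st.1 ++ [PySem.Chars.strip st.2.1]

def pvA_assignStep (d : PySem.Dict String String) (part : List Char) : PySem.Dict String String :=
  if PySem.Chars.isIn ['='] part then
    match PySem.Chars.splitOnMax part ['='] 1 with
    | [left, right] =>
        d.insert (String.ofList (PySem.Chars.strip left)) (String.ofList (pvA_parseValue right))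
    | _ => d   -- unreachable: split('=', 1) with '=' present yields exactly two pieces
  else d

def parse_set_clause (raw : String) : List (String × String) :=
  ((pvA_split raw.toList).foldl pvA_assignStep PySem.Dict.empty).items

-- ===== PORT B =====
def pvB_coerce (raw : List Char) : List Char :=
  let v := PySem.Chars.strip raw
  if decide (2 ≤ v.length) && (PySem.List.pyGet? v 0 == some '"') && (PySem.List.pyGet? v (-1) == some '"') then
    PySem.Chars.slice v (some 1) (some (-1))
  else
    let low := PySem.Chars.lower v
    -- bool/int results of the Python are rendered via str()
    if low = "true".toList ∨ low = "false".toList then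
      (if low = "true".toList then "True".toList else "False".toList)
    else
      match PySem.Int.ofChars? v with
      | some n => PySem.Int.toChars n
      | none => v

def pvB_mergeStep (s : List (List Char) × Option (List Char)) (frag : List Char) :
    List (List Char) × Option (List Char) :=
  let b := match s.2 with | none => frag | some cur => cur ++ ',' :: frag
  if PySem.Chars.count b ['"'] % 2 = 0 then (s.1 ++ [b], none) else (s.1, some b)

def pvB_mergeFinish (st : List (List Char) × Option (List Char)) : List (List Char) :=
  match st.2 with | none => st.1 | some b => st.1 ++ [b]

def pvB_merge (frags : List (List Char)) : List (List Char) :=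
  pvB_mergeFinish (frags.foldl pvB_mergeStep ([], none))

def pvB_assignStep (d : PySem.Dict String String) (part0 : List Char) : PySem.Dict String String :=
  let part := PySem.Chars.strip part0
  -- part.partition('='): left of the first '=', found?, rest (hand-ported, exact)
  let left := part.takeWhile (· ≠ '=')
  if left.length < part.length then
    d.insert (String.ofList (PySem.Chars.strip left)) (String.ofList (pvB_coerce (part.drop (left.length + 1))))
  else d

def parse_set_clause_alt (raw : String) : List (String × String) :=
  ((pvB_merge (PySem.Chars.splitOn raw.toList [','])).foldl pvB_assignStep PySem.Dict.empty).items

-- ===== PRECONDITION & SPEC =====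
def Spec_parse_set_clause (raw : String) (out : List (String × String)) : Prop :=
  out = parse_set_clause_alt raw
instance (raw : String) (out : List (String × String)) : Decidable (Spec_parse_set_clause raw out) := by
  unfold Spec_parse_set_clause; infer_instance

-- ===== CLAIM (what is proved, stated in full; the proofs are below) =====
def Claim_equal_parse_set_clause : Prop :=
  ∀ (raw : String), Dom_parse_set_clause raw →
    Spec_parse_set_clause raw (parse_set_clause raw)

-- ===== LEMMAS AND PROOFS =====

def pvMapHead (f : List Char → List Char) : List (List Char) → List (List Char)
  | [] => []
  | t :: ts => f t :: ts

-- quote-aware top-level comma tokens of the input (the common intermediate of both tokenizers)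
def pvTokens : Bool → List Char → List (List Char)
  | _, [] => [[]]
  | inq, c :: cs =>
    if c = ',' ∧ inq = false then [] :: pvTokens false cs
    else pvMapHead (c :: ·) (pvTokens (if c = '"' then !inq else inq) cs)

-- the plain split of the input at every comma, structurally
def pvCommaSplit : List Char → List (List Char)
  | [] => [[]]
  | c :: cs => if c = ',' then [] :: pvCommaSplit cs else pvMapHead (c :: ·) (pvCommaSplit cs)

-- A's tokenizer result expressed on the tokens: mid tokens stripped and kept when nonempty,
-- the final token kept (stripped) when it is nonempty BEFORE stripping
def pvFinishA : List (List Char) → List (List Char)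
  | [] => []
  | [t] => if t = [] then [] else [PySem.Chars.strip t]
  | t :: t' :: ts =>
    if PySem.Chars.strip t = [] then pvFinishA (t' :: ts)
    else PySem.Chars.strip t :: pvFinishA (t' :: ts)

theorem pvMapHead_cons (f : List Char → List Char) (t : List Char) (ts : List (List Char)) :
    pvMapHead f (t :: ts) = f t :: ts := rfl

theorem pvMapHead_mapHead (f g : List Char → List Char) (l : List (List Char)) :
    pvMapHead f (pvMapHead g l) = pvMapHead (fun t => f (g t)) l := by
  cases l <;> simp [pvMapHead]

theorem pvMapHead_id (l : List (List Char)) : pvMapHead (fun t => t) l = l := by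
  cases l <;> simp [pvMapHead]

theorem pvMapHead_congr {f g : List Char → List Char} (h : ∀ t, f t = g t)
    (l : List (List Char)) : pvMapHead f l = pvMapHead g l := by
  cases l <;> simp [pvMapHead, h]

theorem pvTokens_ne_nil (inq : Bool) (l : List Char) : pvTokens inq l ≠ [] := by
  induction l generalizing inq with
  | nil => simp [pvTokens]
  | cons c cs ih =>
    simp only [pvTokens]
    split
    · simp
    · have := ih (if c = '"' then !inq else inq)
      cases h : pvTokens (if c = '"' then !inq else inq) cs with
      | nil => exact absurd h this
      | cons t ts => simp [pvMapHead]

theorem pvCommaSplit_ne_nil (l : List Char) : pvCommaSplit l ≠ [] := by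
  induction l with
  | nil => simp [pvCommaSplit]
  | cons c cs ih =>
    simp only [pvCommaSplit]
    split
    · simp
    · cases h : pvCommaSplit cs with
      | nil => exact absurd h ih
      | cons t ts => simp [pvMapHead]

theorem count_go_spec (fuel : Nat) (l : List Char) (acc : Nat) (h : l.length ≤ fuel) :
    PySem.Chars.count.go ['"'] fuel l acc = acc + l.count '"' := by
  induction l generalizing fuel acc with
  | nil => cases fuel <;> simp [PySem.Chars.count.go]
  | cons c cs ih =>
    cases fuel with
    | zero => simp at h
    | succ f =>
      simp only [PySem.Chars.count.go]
      by_cases hc : c = '"'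
      · subst hc
        rw [if_pos (by simp [List.isPrefixOf])]
        show PySem.Chars.count.go ['"'] f cs (acc + 1) = _
        rw [ih f (acc+1) (by simpa using h)]
        simp only [List.count_cons]
        simp
        omega
      · rw [if_neg (by simp [List.isPrefixOf]; exact fun hh => hc hh.symm)]
        rw [ih f acc (by simpa using h)]
        simp [List.count_cons, hc]

theorem chars_count_quote (l : List Char) : PySem.Chars.count l ['"'] = l.count '"' := by
  simp only [PySem.Chars.count]
  rw [if_neg (by simp)]
  simpa using count_go_spec l.length l 0 le_rfl

theorem splitOn_go_spec (fuel : Nat) (l cur : List Char) (acc : List (List Char))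
    (h : l.length < fuel) :
    PySem.Chars.splitOn.go [','] fuel l cur acc
      = acc.reverse ++ pvMapHead (fun t => cur.reverse ++ t) (pvCommaSplit l) := by
  induction l generalizing fuel cur acc with
  | nil =>
    cases fuel with
    | zero => simp at h
    | succ f => simp [PySem.Chars.splitOn.go, pvCommaSplit, pvMapHead]
  | cons c cs ih =>
    cases fuel with
    | zero => simp at h
    | succ f =>
      simp only [PySem.Chars.splitOn.go]
      by_cases hc : c = ','
      · subst hc
        rw [if_pos (by simp [List.isPrefixOf])]
        show PySem.Chars.splitOn.go [','] f cs [] (cur.reverse :: acc) = _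
        rw [ih f [] (cur.reverse :: acc) (by simpa using h)]
        cases hcs : pvCommaSplit cs with
        | nil => exact absurd hcs (pvCommaSplit_ne_nil cs)
        | cons t ts => simp [pvCommaSplit, pvMapHead, hcs]
      · rw [if_neg (by simp [List.isPrefixOf]; exact fun hh => hc hh.symm)]
        rw [ih f (c :: cur) acc (by simpa using h)]
        cases hcs : pvCommaSplit cs with
        | nil => exact absurd hcs (pvCommaSplit_ne_nil cs)
        | cons t ts => simp [pvCommaSplit, pvMapHead, hcs, hc]

theorem splitOn_comma (l : List Char) : PySem.Chars.splitOn l [','] = pvCommaSplit l := by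
  simp only [PySem.Chars.splitOn]
  rw [splitOn_go_spec (l.length+1) l [] [] (by omega)]
  cases hl : pvCommaSplit l with
  | nil => exact absurd hl (pvCommaSplit_ne_nil l)
  | cons t ts => simp [pvMapHead]

theorem splitOnMax_go_zero (fuel : Nat) (l : List Char) (acc : List (List Char)) :
    PySem.Chars.splitOnMax.go ['='] fuel 0 l [] acc = acc.reverse ++ [l] := by
  cases fuel with
  | zero => simp [PySem.Chars.splitOnMax.go]
  | succ f => cases l <;> simp [PySem.Chars.splitOnMax.go]

theorem splitOnMax_go_spec (fuel : Nat) (l cur : List Char) (acc : List (List Char))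
    (h : l.length < fuel) :
    PySem.Chars.splitOnMax.go ['='] fuel 1 l cur acc
      = if '=' ∈ l then
          acc.reverse ++ [cur.reverse ++ l.takeWhile (· ≠ '='),
            l.drop ((l.takeWhile (· ≠ '=')).length + 1)]
        else acc.reverse ++ [cur.reverse ++ l] := by
  induction l generalizing fuel cur acc with
  | nil =>
    cases fuel with
    | zero => simp at h
    | succ f => simp [PySem.Chars.splitOnMax.go]
  | cons c cs ih =>
    cases fuel with
    | zero => simp at h
    | succ f =>
      simp only [PySem.Chars.splitOnMax.go]
      rw [if_neg (by omega)]
      by_cases hc : c = '='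
      · subst hc
        rw [if_pos (by simp [List.isPrefixOf])]
        show PySem.Chars.splitOnMax.go ['='] f 0 cs [] (cur.reverse :: acc) = _
        rw [splitOnMax_go_zero]
        simp [List.takeWhile]
      · rw [if_neg (by simp [List.isPrefixOf]; exact fun hh => hc hh.symm)]
        rw [ih f (c :: cur) acc (by simpa using h)]
        by_cases hm : '=' ∈ cs
        · rw [if_pos hm, if_pos (by simp [hm, hc])]
          simp [List.takeWhile, hc]
        · rw [if_neg hm, if_neg (by simp [hm]; exact fun hh => hc hh.symm)]
          simp

theorem splitOnMax_eq_of_mem (p : List Char) (h : '=' ∈ p) :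
    PySem.Chars.splitOnMax p ['='] 1 =
      [p.takeWhile (· ≠ '='), p.drop ((p.takeWhile (· ≠ '=')).length + 1)] := by
  simp only [PySem.Chars.splitOnMax]
  rw [if_neg (by omega)]
  have : (1:Int).toNat = 1 := rfl
  rw [this, splitOnMax_go_spec (p.length+1) p [] [] (by omega), if_pos h]
  simp

theorem count_snoc (cur : List Char) (c : Char) :
    List.count '"' (cur ++ [c]) = List.count '"' cur + (if c = '"' then 1 else 0) := by
  by_cases h : c = '"' <;> simp [List.count_append, h]

theorem foldl_some (fs : List (List Char)) (parts : List (List Char)) (b : List Char)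
    (h : fs ≠ []) :
    fs.foldl pvB_mergeStep (parts, some b)
      = (pvMapHead (fun f => b ++ ',' :: f) fs).foldl pvB_mergeStep (parts, none) := by
  cases fs with
  | nil => exact absurd rfl h
  | cons f fs' => simp [pvMapHead, List.foldl_cons, pvB_mergeStep]

theorem merge_run (l : List Char) : ∀ (cur : List Char) (parts : List (List Char)),
    pvB_mergeFinish ((pvMapHead (fun t => cur ++ t) (pvCommaSplit l)).foldl pvB_mergeStep (parts, none))
      = parts ++ pvMapHead (fun t => cur ++ t) (pvTokens (decide (cur.count '"' % 2 = 1)) l) := by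
  induction l with
  | nil =>
    intro cur parts
    simp only [pvCommaSplit, pvTokens, pvMapHead_cons, List.foldl_cons, List.foldl_nil]
    by_cases he : cur.count '"' % 2 = 0
    · simp [pvB_mergeStep, pvB_mergeFinish, chars_count_quote, he]
    · simp [pvB_mergeStep, pvB_mergeFinish, chars_count_quote, he]
  | cons c cs ih =>
    intro cur parts
    have hmapnil : pvMapHead (fun t => ([]:List Char) ++ t) (pvCommaSplit cs) = pvCommaSplit cs := by
      rw [pvMapHead_congr (g := fun t => t) (fun t => List.nil_append t), pvMapHead_id]
    by_cases hc : c = ','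
    · subst hc
      by_cases hp : cur.count '"' % 2 = 0
      · -- even quote count: flush the buffer at this comma
        have hd : decide (cur.count '"' % 2 = 1) = false := by
          simp only [decide_eq_false_iff_not]; omega
        simp only [pvCommaSplit, reduceIte, pvMapHead_cons, List.foldl_cons]
        rw [show pvB_mergeStep (parts, none) (cur ++ []) = (parts ++ [cur], none) by
          simp [pvB_mergeStep, chars_count_quote, hp]]
        rw [← hmapnil, ih [] (parts ++ [cur])]
        rw [pvMapHead_congr (g := fun t => t) (fun t => List.nil_append t), pvMapHead_id]
        rw [hd]
        simp only [pvTokens]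
        rw [if_pos ⟨trivial, trivial⟩]
        rw [show decide (List.count '"' ([]:List Char) % 2 = 1) = false by decide]
        cases ht : pvTokens false cs with
        | nil => exact absurd ht (pvTokens_ne_nil _ _)
        | cons t ts => simp [pvMapHead_cons]
      · -- odd quote count: the comma is inside quotes, keep merging
        have hd : decide (cur.count '"' % 2 = 1) = true := by
          simp only [decide_eq_true_eq]; omega
        simp only [pvCommaSplit, reduceIte, pvMapHead_cons, List.foldl_cons]
        rw [show pvB_mergeStep (parts, none) (cur ++ []) = (parts, some cur) by
          simp [pvB_mergeStep, chars_count_quote, hp]]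
        rw [foldl_some _ _ _ (pvCommaSplit_ne_nil cs)]
        rw [pvMapHead_congr (g := fun t => (cur ++ [',']) ++ t)
          (fun t => by simp), ih (cur ++ [','])]
        have hd2 : decide ((cur ++ [',']).count '"' % 2 = 1) = true := by
          simp only [decide_eq_true_eq, count_snoc]
          rw [if_neg (by decide)]
          omega
        rw [hd2, hd]
        simp only [pvTokens]
        rw [if_neg (by simp)]
        rw [show (if (',':Char) = '"' then !true else true) = true from rfl]
        rw [pvMapHead_mapHead]
        exact congrArg (parts ++ ·) (pvMapHead_congr (fun t => by simp) _)
    · -- c is not a comma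
      simp only [pvCommaSplit, if_neg hc, pvMapHead_mapHead]
      rw [pvMapHead_congr (g := fun t => (cur ++ [c]) ++ t) (fun t => by simp), ih (cur ++ [c])]
      simp only [pvTokens]
      rw [if_neg (by simp [hc])]
      have hpar : decide ((cur ++ [c]).count '"' % 2 = 1)
          = (if c = '"' then !(decide (cur.count '"' % 2 = 1)) else decide (cur.count '"' % 2 = 1)) := by
        by_cases hq : c = '"'
        · subst hq
          simp only [count_snoc, reduceIte]
          rcases Nat.even_or_odd (List.count '"' cur) with he | ho
          · have h0 : List.count '"' cur % 2 = 0 := Nat.even_iff.mp he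
            simp [Nat.add_mod, h0]
          · have h1 : List.count '"' cur % 2 = 1 := Nat.odd_iff.mp ho
            simp [Nat.add_mod, h1]
        · simp [count_snoc, hq]
      rw [hpar, pvMapHead_mapHead]
      exact congrArg (parts ++ ·) (pvMapHead_congr (fun t => by simp) _)

theorem merge_splitOn (l : List Char) :
    pvB_merge (PySem.Chars.splitOn l [',']) = pvTokens false l := by
  rw [splitOn_comma, pvB_merge]
  have h2 : pvMapHead (fun t => ([]:List Char) ++ t) (pvCommaSplit l) = pvCommaSplit l := by
    rw [pvMapHead_congr (g := fun t => t) (fun t => List.nil_append t), pvMapHead_id]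
  have h3 : pvMapHead (fun t => ([]:List Char) ++ t) (pvTokens (decide (List.count '"' ([]:List Char) % 2 = 1)) l) = pvTokens false l := by
    rw [pvMapHead_congr (g := fun t => t) (fun t => List.nil_append t), pvMapHead_id]
    norm_num
  have := merge_run l [] []
  rw [h2, h3] at this
  simpa using this

theorem A_run (l : List Char) : ∀ (items : List (List Char)) (cur : List Char) (inq : Bool),
    (let st := l.foldl pvA_splitStep (items, cur, inq);
     if st.2.1 = [] then st.1 else st.1 ++ [PySem.Chars.strip st.2.1])
    = items ++ pvFinishA (pvMapHead (fun t => cur ++ t) (pvTokens inq l)) := by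
  induction l with
  | nil =>
    intro items cur inq
    simp only [List.foldl_nil, pvTokens, pvMapHead_cons, pvFinishA]
    by_cases h : cur = [] <;> simp [h, pvFinishA]
  | cons c cs ih =>
    intro items cur inq
    simp only [List.foldl_cons]
    by_cases hq : c = '"'
    · subst hq
      rw [show pvA_splitStep (items, cur, inq) '"' = (items, cur ++ ['"'], !inq) by
        simp [pvA_splitStep]]
      rw [ih items (cur ++ ['"']) (!inq)]
      simp only [pvTokens]
      rw [if_neg (by simp), if_pos trivial, pvMapHead_mapHead]
      exact congrArg (items ++ ·) (congrArg pvFinishA (pvMapHead_congr (fun t => by simp) _))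
    · by_cases hcm : c = ',' ∧ inq = false
      · obtain ⟨hc, hi⟩ := hcm
        subst hc; subst hi
        rw [show pvA_splitStep (items, cur, false) ','
            = ((if PySem.Chars.strip cur = [] then items else items ++ [PySem.Chars.strip cur]), [], false) by
          simp [pvA_splitStep]]
        rw [ih _ [] false]
        simp only [pvTokens]
        rw [if_pos ((⟨trivial, trivial⟩ : True ∧ True))]
        rw [pvMapHead_cons]
        cases ht : pvTokens false cs with
        | nil => exact absurd ht (pvTokens_ne_nil _ _)
        | cons t ts =>
          rw [pvMapHead_cons]
          simp only [List.nil_append]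
          by_cases hsc : PySem.Chars.strip cur = []
          · simp [pvFinishA, hsc]
          · simp [pvFinishA, hsc]
      · have hc' : ¬(c = ',' && !inq) = true := by
          simp only [Bool.and_eq_true, Bool.not_eq_true']
          rintro ⟨h1, h2⟩
          exact hcm ⟨by simpa using h1, h2⟩
        rw [show pvA_splitStep (items, cur, inq) c = (items, cur ++ [c], inq) by
          simp only [pvA_splitStep, if_neg hq]; rw [if_neg hc']]
        rw [ih items (cur ++ [c]) inq]
        simp only [pvTokens]
        rw [if_neg hcm, if_neg hq, pvMapHead_mapHead]
        exact congrArg (items ++ ·) (congrArg pvFinishA (pvMapHead_congr (fun t => by simp) _))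

theorem A_split_tokens (l : List Char) : pvA_split l = pvFinishA (pvTokens false l) := by
  have := A_run l [] [] false
  simpa [pvA_split, pvMapHead_congr (g := fun t => t) (fun t => List.nil_append t), pvMapHead_id] using this

theorem get0 (s : List Char) : PySem.List.pyGet? s 0 = s.head? := by
  cases s <;> simp [PySem.List.pyGet?, PySem.List.pyIdx?]

theorem getm1 (s : List Char) (h : s ≠ []) : PySem.List.pyGet? s (-1) = s.getLast? := by
  have hl : 0 < s.length := List.length_pos_iff.mpr h
  simp only [PySem.List.pyGet?, PySem.List.pyIdx?]
  rw [if_neg (by omega), if_pos (by omega)]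
  rw [List.getLast?_eq_getElem?]
  simp

theorem sw (s : List Char) : PySem.Chars.startswith s ['"'] = (s.head? == some '"') := by
  cases s with
  | nil => simp [PySem.Chars.startswith, List.isPrefixOf]
  | cons c cs =>
    simp only [PySem.Chars.startswith, List.isPrefixOf, List.head?]
    by_cases h : c = '"' <;> simp [h]
    · exact fun hh => absurd hh.symm h

theorem ew (s : List Char) : PySem.Chars.endswith s ['"'] = (s.getLast? == some '"') := by
  simp only [PySem.Chars.endswith]
  rw [show List.isSuffixOf ['"'] s = List.isPrefixOf ['"'] s.reverse from rfl]
  have := sw s.reverse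
  rw [show PySem.Chars.startswith s.reverse ['"'] = List.isPrefixOf ['"'] s.reverse from rfl] at this
  rw [this, List.head?_reverse]

theorem coerce_eq (v : List Char) : pvA_parseValue v = pvB_coerce v := by
  simp only [pvA_parseValue, pvB_coerce]
  have hcond : (PySem.Chars.startswith (PySem.Chars.strip v) ['"']
        && PySem.Chars.endswith (PySem.Chars.strip v) ['"']
        && decide (2 ≤ (PySem.Chars.strip v).length))
      = (decide (2 ≤ (PySem.Chars.strip v).length)
        && (PySem.List.pyGet? (PySem.Chars.strip v) 0 == some '"')
        && (PySem.List.pyGet? (PySem.Chars.strip v) (-1) == some '"')) := by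
    generalize PySem.Chars.strip v = s
    by_cases hnil : s = []
    · subst hnil
      simp [PySem.Chars.startswith, List.isPrefixOf]
    · rw [sw, ew, get0, getm1 s hnil]
      cases h2 : decide (2 ≤ s.length) <;> simp
  rw [hcond]
  split
  · rfl
  · split_ifs with h1 h2 h3 <;> simp_all

theorem tw_lt (q : List Char) (h : '=' ∈ q) : (q.takeWhile (· ≠ '=')).length < q.length := by
  have hne : q.takeWhile (· ≠ '=') ≠ q := by
    intro he
    have := List.takeWhile_eq_self_iff.mp he '=' h
    simp at this
  have hle : (q.takeWhile (· ≠ '=')).length ≤ q.length :=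
    (List.takeWhile_prefix _).sublist.length_le
  rcases lt_or_eq_of_le hle with h1 | h2
  · exact h1
  · exact absurd ((List.takeWhile_prefix _).eq_of_length h2) hne

theorem tw_eq (q : List Char) (h : '=' ∉ q) : q.takeWhile (· ≠ '=') = q := by
  apply List.takeWhile_eq_self_iff.mpr
  intro x hx
  simp
  exact fun he => h (he ▸ hx)

theorem assign_step_eq (d : PySem.Dict String String) (q : List Char) :
    pvA_assignStep d q =
      (if (q.takeWhile (· ≠ '=')).length < q.length then
        d.insert (String.ofList (PySem.Chars.strip (q.takeWhile (· ≠ '='))))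
          (String.ofList (pvB_coerce (q.drop ((q.takeWhile (· ≠ '=')).length + 1))))
      else d) := by
  by_cases hm : '=' ∈ q
  · have hin : PySem.Chars.isIn ['='] q = true :=
      (PySem.Chars.isIn_iff_infix ['='] q).mpr ((List.singleton_infix_iff '=' q).mpr hm)
    simp only [pvA_assignStep, hin, if_true, splitOnMax_eq_of_mem q hm, coerce_eq]
    rw [if_pos (tw_lt q hm)]
  · have hin : PySem.Chars.isIn ['='] q = false := by
      rw [PySem.Chars.isIn_eq_false_iff]
      exact fun hif => hm ((List.singleton_infix_iff '=' q).mp hif)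
    have hlt : ¬ (q.takeWhile (· ≠ '=')).length < q.length := by
      rw [tw_eq q hm]; omega
    simp only [pvA_assignStep, hin, Bool.false_eq_true, if_false]
    rw [if_neg hlt]

theorem assign_A_B (d : PySem.Dict String String) (t : List Char) :
    pvA_assignStep d (PySem.Chars.strip t) = pvB_assignStep d t := by
  rw [assign_step_eq]; rfl

theorem B_skip (d : PySem.Dict String String) (t : List Char)
    (h : PySem.Chars.strip t = []) : pvB_assignStep d t = d := by
  simp [pvB_assignStep, h]

theorem fold_eq (ts : List (List Char)) : ∀ (d : PySem.Dict String String),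
    (pvFinishA ts).foldl pvA_assignStep d = ts.foldl pvB_assignStep d := by
  induction ts with
  | nil => intro d; rfl
  | cons t rest ih =>
    intro d
    cases rest with
    | nil =>
      by_cases h : t = []
      · subst h
        simp only [pvFinishA, reduceIte, List.foldl_nil, List.foldl_cons]
        rw [B_skip d [] rfl]
      · simp only [pvFinishA, if_neg h, List.foldl_cons, List.foldl_nil]
        exact assign_A_B d t
    | cons t' rest' =>
      by_cases h : PySem.Chars.strip t = []
      · rw [show pvFinishA (t :: t' :: rest') = pvFinishA (t' :: rest') by
          simp [pvFinishA, h]]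
        rw [ih d]
        conv_rhs => rw [List.foldl_cons, B_skip d t h]
      · rw [show pvFinishA (t :: t' :: rest')
            = PySem.Chars.strip t :: pvFinishA (t' :: rest') by simp [pvFinishA, h]]
        conv_lhs => rw [List.foldl_cons]
        conv_rhs => rw [List.foldl_cons]
        rw [assign_A_B d t]
        exact ih _

theorem main_eq (raw : String) : parse_set_clause raw = parse_set_clause_alt raw := by
  unfold parse_set_clause parse_set_clause_alt
  rw [A_split_tokens, merge_splitOn, fold_eq]

-- ===== VERDICT (by name: the statement is the Claim_ definition above) =====
theorem parse_set_clause_spec : Claim_equal_parse_set_clause := by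
  intro raw _
  exact main_eq raw
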